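-- pv_equiv track=rewrite | github.com/raciard/labsimulations1 | src/simulation/metrics.py | _find_max_change_point
-- ===== SOURCE A (Python) =====
-- def _find_max_change_point(curve):
--     """Fallback method: find point with maximum rate of change decrease.
--
--     Args:
--         curve: List of values
--
--     Returns:
--         Index where the rate of change stabilizes most
--     """
--     if len(curve) < 3:
--         return 0
--
--     # Compute second derivative (rate of change of rate of change)
--     second_derivative = []
--     for i in range(1, len(curve) - 1):
--         d2 = curve[i+1] - 2*curve[i] + curve[i-1]
--         second_derivative.append(abs(d2))
--
--     if not second_derivative:
--         return 0
--
--     # Find maximum change in curvature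
--     max_idx = second_derivative.index(max(second_derivative))
--     return max_idx + 1  # Adjust for offset
-- ===== SOURCE B (Python) =====
-- def _find_max_change_point(curve):
--     """One fused pass over consecutive triples: no intermediate list, no
--     separate max/index scans; strict '>' keeps the first maximum like
--     list.index(max(...))."""
--     if len(curve) < 3:
--         return 0
--     triples = zip(curve, curve[1:], curve[2:])
--     a, b, c = next(triples)
--     best_val, best_idx = abs(c - 2 * b + a), 1
--     for i, (a, b, c) in enumerate(triples, start=2):
--         d2 = abs(c - 2 * b + a)
--         if d2 > best_val:
--             best_val, best_idx = d2, i
--     return best_idx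
-- ===== Notes on version B (the rewrite author's own statement) =====
-- stated objective: simpler
-- what changed: B replaces A's build-a-second-derivative-list plus separate max() and .index() scans with one fused pass over consecutive triples (zip of shifted views) that maintains the running best value and its index, updating only on strict '>' so the first maximum wins.
import Mathlib
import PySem

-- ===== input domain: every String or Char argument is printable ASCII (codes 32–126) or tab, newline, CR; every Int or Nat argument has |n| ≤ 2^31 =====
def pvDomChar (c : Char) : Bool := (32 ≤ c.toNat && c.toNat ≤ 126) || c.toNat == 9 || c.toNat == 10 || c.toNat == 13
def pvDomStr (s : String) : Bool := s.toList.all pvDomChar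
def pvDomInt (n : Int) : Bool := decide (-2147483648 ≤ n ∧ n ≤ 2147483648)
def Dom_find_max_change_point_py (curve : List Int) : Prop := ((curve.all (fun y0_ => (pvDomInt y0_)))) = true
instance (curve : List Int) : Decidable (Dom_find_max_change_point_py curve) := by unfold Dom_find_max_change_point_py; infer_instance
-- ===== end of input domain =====

-- B fuses A's second-derivative list + separate max() and .index() scans into one pass over
-- consecutive triples keeping the running best (strict '>', so the first maximum wins); objective: simpler.

-- ===== PORT A =====
def find_max_change_point_py (curve : List Int) : Int :=
  if (curve.length : Int) < 3 then 0
  else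
    let second_derivative :=
      (PySem.List.pyRange 1 ((curve.length : Int) - 1) 1).foldl
        (fun acc i =>
          acc ++ [|PySem.List.pyGetD curve (i + 1) 0 - 2 * PySem.List.pyGetD curve i 0 +
                    PySem.List.pyGetD curve (i - 1) 0|]) []
    if second_derivative = [] then 0
    else
      match PySem.List.max? second_derivative (fun y => y) with
      | none => 0   -- unreachable: second_derivative ≠ []
      | some m =>
        match PySem.List.index? second_derivative m with
        | none => 0 -- unreachable: m ∈ second_derivative
        | some max_idx => (max_idx : Int) + 1

-- ===== PORT B =====
-- the 'for i, (a,b,c) in enumerate(triples, start=2)' loop of Source B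
def fmcLoop : Int → Int → Int → Int → Int → List Int → Int
  | _, best_idx, _, _, _, [] => best_idx
  | best_val, best_idx, i, a, b, c :: rest =>
      let d2 := |c - 2 * b + a|
      if d2 > best_val then fmcLoop d2 i (i + 1) b c rest
      else fmcLoop best_val best_idx (i + 1) b c rest

def find_max_change_point_py_alt (curve : List Int) : Int :=
  if (curve.length : Int) < 3 then 0
  else
    match curve with
    | a :: b :: c :: rest => fmcLoop (|c - 2 * b + a|) 1 2 b c rest
    | _ => 0  -- unreachable: length ≥ 3

-- ===== PRECONDITION & SPEC =====
def Spec_find_max_change_point_py (curve : List Int) (out : Int) : Prop := out = find_max_change_point_py_alt curve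
instance (curve : List Int) (out : Int) : Decidable (Spec_find_max_change_point_py curve out) := by unfold Spec_find_max_change_point_py; infer_instance

-- ===== CLAIM (what is proved, stated in full; the proofs are below) =====
def Claim_equal_find_max_change_point_py : Prop := ∀ (curve : List Int), Dom_find_max_change_point_py curve → Spec_find_max_change_point_py curve (find_max_change_point_py curve)

-- ===== LEMMAS AND PROOFS =====

-- the list of |second-derivative| values of a :: b :: rest (positions 1 .. length-2)
def d2s : Int → Int → List Int → List Int
  | _, _, [] => []
  | a, b, c :: rest => |c - 2 * b + a| :: d2s b c rest

theorem pyGetD_cons_shift (x : Int) (xs : List Int) (i : Int) (h : 0 ≤ i) :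
    PySem.List.pyGetD (x :: xs) (i + 1) 0 = PySem.List.pyGetD xs i 0 := by
  obtain ⟨k, rfl⟩ := Int.eq_ofNat_of_zero_le h
  have : ((k : Int) + 1) = ((k + 1 : Nat) : Int) := by push_cast; ring
  rw [this, PySem.List.pyGetD_natCast, PySem.List.pyGetD_natCast, List.getD_cons_succ]

-- A's second_derivative list is d2s
theorem sd_eq (rest : List Int) : ∀ (a b : Int),
    (PySem.List.pyRange 1 ((a :: b :: rest).length - 1) 1).map
      (fun i => |PySem.List.pyGetD (a :: b :: rest) (i + 1) 0 -
          2 * PySem.List.pyGetD (a :: b :: rest) i 0 +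
          PySem.List.pyGetD (a :: b :: rest) (i - 1) 0|) = d2s a b rest := by
  induction rest with
  | nil =>
    intro a b
    rw [PySem.List.pyRange_one_eq_nil (by simp)]
    simp [d2s]
  | cons c t ih =>
    intro a b
    rw [PySem.List.pyRange_one_cons (by simp)]
    simp only [List.map_cons]
    congr 1
    · have h2 : (1 : Int) + 1 = (0 : Int) + 1 + 1 := by ring
      have e1 : PySem.List.pyGetD (a :: b :: c :: t) ((1:Int) + 1) 0 = c := by
        rw [h2, pyGetD_cons_shift _ _ _ (by omega), pyGetD_cons_shift _ _ _ (by omega),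
          PySem.List.pyGetD_zero_cons]
      have e2 : PySem.List.pyGetD (a :: b :: c :: t) (1:Int) 0 = b := by
        rw [show (1:Int) = 0 + 1 by ring, pyGetD_cons_shift _ _ _ (by omega),
          PySem.List.pyGetD_zero_cons]
      have e3 : PySem.List.pyGetD (a :: b :: c :: t) ((1:Int) - 1) 0 = a := by
        norm_num [PySem.List.pyGetD_zero_cons]
      rw [e1, e2, e3]
    · rw [← ih b c]
      have hL : ((a :: b :: c :: t).length : Int) - 1 - (1 + 1) = ((t.length : Int)) := by
        simp; omega
      have hR : ((b :: c :: t).length : Int) - 1 - 1 = ((t.length : Int)) := by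
        simp
      rw [PySem.List.pyRange_one, PySem.List.pyRange_one, hL, hR, Int.toNat_natCast,
        List.map_map, List.map_map]
      apply List.map_congr_left
      intro k _
      simp only [Function.comp_apply]
      have c1 : (1 : Int) + 1 + k + 1 = (1 + k + 1) + 1 := by ring
      have c2 : (1 : Int) + 1 + k = (1 + k) + 1 := by ring
      rw [c1, c2]
      have c3 : (1 : Int) + k + 1 - 1 = (1 + k - 1) + 1 := by ring
      rw [c3, pyGetD_cons_shift _ _ _ (by positivity), pyGetD_cons_shift _ _ _ (by positivity),
        pyGetD_cons_shift _ _ _ (by omega), pyGetD_cons_shift _ _ _ (by omega)]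

-- abstract version of B's loop, over the d2 list itself
def scan : Int → Int → Int → List Int → Int
  | _, bi, _, [] => bi
  | bv, bi, i, x :: xs => if x > bv then scan x i (i + 1) xs else scan bv bi (i + 1) xs

theorem fmcLoop_eq_scan (rest : List Int) : ∀ (a b bv bi i : Int),
    fmcLoop bv bi i a b rest = scan bv bi i (d2s a b rest) := by
  induction rest with
  | nil => intro a b bv bi i; simp [fmcLoop, d2s, scan]
  | cons c t ih =>
    intro a b bv bi i
    simp only [fmcLoop, d2s, scan]
    split_ifs with h
    · exact ih b c _ _ _
    · exact ih b c _ _ _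

-- what the strict-'>' running-best scan computes: the first index of the running maximum
theorem scan_eq (t : List Int) : ∀ bv bi i : Int,
    scan bv bi i t = if bv < t.foldl max bv then i + (t.idxOf (t.foldl max bv) : Int) else bi := by
  induction t with
  | nil => intro bv bi i; simp [scan]
  | cons x xs ih =>
    intro bv bi i
    simp only [scan, List.foldl_cons]
    by_cases hx : x > bv
    · rw [if_pos hx, ih, max_eq_right hx.le]
      have hM : x ≤ xs.foldl max x := (PySem.List.le_foldl_max xs x).1
      by_cases hMx : xs.foldl max x = x
      · rw [hMx] at *
        simp [List.idxOf_cons_self, hx]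
      · have h1 : x < xs.foldl max x := lt_of_le_of_ne hM (Ne.symm hMx)
        rw [if_pos h1, if_pos (lt_trans hx h1)]
        rw [List.idxOf_cons_ne _ (by exact fun h => hMx h.symm)]
        push_cast; ring
    · rw [if_neg hx, ih, max_eq_left (not_lt.mp hx)]
      by_cases hM : bv < xs.foldl max bv
      · rw [if_pos hM, if_pos hM]
        have hne : xs.foldl max bv ≠ x := by
          intro h; rw [h] at hM; exact hx hM
        rw [List.idxOf_cons_ne _ (fun h => hne h.symm)]
        push_cast; ring
      · rw [if_neg hM, if_neg hM]

theorem index?_mem_eq (l : List Int) (v : Int) (h : v ∈ l) :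
    PySem.List.index? l v = some (l.idxOf v) := by
  induction l with
  | nil => simp at h
  | cons x xs ih =>
    by_cases hx : x = v
    · subst hx
      rw [PySem.List.index?_cons_self, List.idxOf_cons_self]
    · rw [PySem.List.index?_cons_of_ne _ hx,
        ih (by cases h with | head => exact absurd rfl hx | tail _ h => exact h),
        List.idxOf_cons_ne _ hx]
      simp

-- ===== VERDICT (by name: the statement is the Claim_ definition above) =====
theorem find_max_change_point_py_spec : Claim_equal_find_max_change_point_py := by
  intro curve _
  unfold Spec_find_max_change_point_py find_max_change_point_py find_max_change_point_py_alt
  by_cases h3 : (curve.length : Int) < 3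
  · simp [h3]
  · rw [if_neg h3, if_neg h3]
    obtain ⟨a, b, c, rest, rfl⟩ : ∃ a b c rest, curve = a :: b :: c :: rest := by
      match curve with
      | [] | [_] | [_, _] => simp at h3
      | a :: b :: c :: rest => exact ⟨a, b, c, rest, rfl⟩
    simp only [PySem.List.foldl_append_singleton_eq_map, List.nil_append]
    rw [sd_eq (c :: rest) a b]
    simp only [d2s]
    rw [fmcLoop_eq_scan, scan_eq]
    set x := |c - 2 * b + a| with hx
    set τ := d2s b c rest with hτ
    rw [if_neg (by simp)]
    simp only [PySem.List.max?_id_cons]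
    set m := τ.foldl max x with hm
    by_cases hlt : x < m
    · have hmem : m ∈ τ := by
        rcases PySem.List.foldl_max_mem τ x with h | h
        · exact absurd h (ne_of_gt hlt)
        · exact h
      simp only [PySem.List.index?_cons_of_ne _ (ne_of_lt hlt), index?_mem_eq τ m hmem,
        Option.map_some, if_pos hlt]
      push_cast; ring
    · have hxm : m = x := le_antisymm (by omega) (PySem.List.le_foldl_max τ x).1
      rw [hxm] at hlt ⊢
      simp only [PySem.List.index?_cons_self, if_neg hlt]
      norm_num
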